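-- pv_equiv track=rewrite | github.com/seijinrosen/kyopro | algo-method.com/tasks/1087/main.py | solve
-- ===== SOURCE A (Python) =====
-- from typing import Iterator, Tuple
--
-- def solve(bits: Tuple[int, ...]) -> int:
--     stack: list[int] = []
--     now = 1
--     for i, op in enumerate(bits, 2):
--         if op:
--             now *= i
--         else:
--             stack.append(now)
--             now = i
--     return sum(stack) + now
-- ===== SOURCE B (Python) =====
-- from typing import Tuple
--
-- def solve(bits: Tuple[int, ...]) -> int:
--     # Factorial-table algorithm (alternative, not faster): each maximal multiplicative
--     # segment is a run of
--     # consecutive integers s..e, whose product is fact[e] // fact[s-1].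
--     n = len(bits)
--     fact = [1]
--     for k in range(1, n + 2):
--         fact.append(fact[-1] * k)
--     zeros = [i for i, op in enumerate(bits, 2) if not op]
--     starts = [2] + zeros
--     ends = [z - 1 for z in zeros] + [n + 1]
--     return sum(fact[e] // fact[s - 1] for s, e in zip(starts, ends))
-- ===== Notes on version B (the rewrite author's own statement) =====
-- stated objective: alternative
-- what changed: B uses a different algorithm: it precomputes a factorial table, reads the segment boundaries off the positions of the falsy flags, and returns the sum of fact[e] // fact[s-1] quotients, instead of A's single multiply-as-you-go pass with a running product and a stack of finished products; the big factorials make B slower than A on large inputs.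
import Mathlib
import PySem

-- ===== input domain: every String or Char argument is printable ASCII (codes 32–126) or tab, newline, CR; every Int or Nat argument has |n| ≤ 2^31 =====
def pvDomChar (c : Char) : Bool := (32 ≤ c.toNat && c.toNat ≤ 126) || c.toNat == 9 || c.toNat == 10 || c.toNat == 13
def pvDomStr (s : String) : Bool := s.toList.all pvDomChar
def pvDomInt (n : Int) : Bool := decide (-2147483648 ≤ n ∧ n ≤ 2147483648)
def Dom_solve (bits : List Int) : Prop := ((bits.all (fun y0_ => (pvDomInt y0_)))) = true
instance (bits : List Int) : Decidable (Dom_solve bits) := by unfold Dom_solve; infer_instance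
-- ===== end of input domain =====

-- B replaces A's multiply-as-you-go stack loop by a different algorithm: it precomputes a
-- factorial table and returns Σ fact[e] // fact[s-1] over the segment boundaries read off
-- from the positions of the falsy flags (an alternative of the same value; the big factorials
-- make B slower than A on large inputs).


-- ===== PORT A =====
-- the loop of A: state (stack, now), index i running from 2
def solveAux (bits : List Int) (i : Int) (stack : List Int) (now : Int) : Int :=
  match bits with
  | [] => stack.sum + now
  | op :: rest =>
      if op ≠ 0 then solveAux rest (i + 1) stack (now * i)
      else solveAux rest (i + 1) (stack ++ [now]) i

def solve (bits : List Int) : Int := solveAux bits 2 [] 1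

-- ===== PORT B =====
-- Source B: factorial table built by a loop appending fact[-1] * k, zero positions from
-- enumerate(bits, 2), then sum of fact[e] // fact[s - 1] over zip(starts, ends).
def solve_alt (bits : List Int) : Int :=
  let n : Int := PySem.List.len bits
  let fact : List Int :=
    (PySem.List.pyRange 1 (n + 2) 1).foldl
      (fun acc k => acc ++ [PySem.List.pyGetD acc (-1) 0 * k]) [1]
  let zeros : List Int :=
    (PySem.List.enumerate bits 2).filterMap (fun p => if p.2 == 0 then some p.1 else none)
  let starts : List Int := [2] ++ zeros
  let ends : List Int := zeros.map (fun z => z - 1) ++ [n + 1]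
  ((starts.zip ends).map
    (fun p => PySem.Int.floordiv (PySem.List.pyGetD fact p.2 0)
                                 (PySem.List.pyGetD fact (p.1 - 1) 0))).sum

-- ===== PRECONDITION & SPEC =====
def Spec_solve (bits : List Int) (out : Int) : Prop := out = solve_alt bits
instance (bits : List Int) (out : Int) : Decidable (Spec_solve bits out) := by unfold Spec_solve; infer_instance

-- ===== CLAIM (what is proved, stated in full; the proofs are below) =====
def Claim_equal_solve : Prop := ∀ (bits : List Int), Dom_solve bits → Spec_solve bits (solve bits)

-- ===== LEMMAS AND PROOFS =====

-- product of the consecutive integers a..b (empty when b < a)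
def prodRange (a b : Int) : Int := (PySem.List.pyRange a (b + 1) 1).prod

-- factorial of a (nonnegative) integer
def fac (k : Int) : Int := (k.toNat.factorial : Int)

-- positions (counted from i) of the falsy flags
def zerosOf : List Int → Int → List Int
  | [], _ => []
  | op :: rest, i => if op = 0 then i :: zerosOf rest (i + 1) else zerosOf rest (i + 1)

-- sum of segment products: starts s :: zs, ends (zs.map (·-1)) ++ [last]
def pairSum : Int → List Int → Int → Int
  | s, [], last => prodRange s last
  | s, z :: zs, last => prodRange s (z - 1) + pairSum z zs last

theorem prodRange_self (i : Int) : prodRange i i = i := by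
  simp [prodRange, PySem.List.pyRange_one_singleton]

theorem prodRange_empty (s : Int) : prodRange s (s - 1) = 1 := by
  have h : s - 1 + 1 = s := by ring
  simp [prodRange, h, PySem.List.pyRange_one_eq_nil (le_refl s)]

theorem prodRange_succ (s i : Int) (h : s ≤ i) :
    prodRange s (i - 1) * i = prodRange s i := by
  have h1 : i - 1 + 1 = i := by ring
  unfold prodRange
  rw [h1, PySem.List.pyRange_one_succ_right (a := s) (b := i) h]
  simp

theorem fac_mul (s : Int) (hs : 1 ≤ s) : ∀ (d : Nat),
    fac (s - 1 + d) = fac (s - 1) * prodRange s (s - 1 + d) := by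
  intro d
  induction d with
  | zero => simp [prodRange_empty]
  | succ d ih =>
      have harg : s - 1 + ((d + 1 : Nat) : Int) = (s - 1 + d) + 1 := by push_cast; ring
      rw [harg]
      have hcast : ((s - 1 + (d : Int)).toNat : Int) = s - 1 + d := by omega
      have hfac : fac (s - 1 + d + 1) = (s - 1 + d + 1) * fac (s - 1 + d) := by
        unfold fac
        have htn : (s - 1 + (d : Int) + 1).toNat = (s - 1 + d).toNat + 1 := by omega
        rw [htn, Nat.factorial_succ]
        push_cast [hcast]
        ring
      have hpr : prodRange s (s - 1 + d + 1) = prodRange s (s - 1 + d) * (s - 1 + d + 1) := by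
        have hsucc := prodRange_succ s (s - 1 + d + 1) (by omega)
        have h3 : s - 1 + (d : Int) + 1 - 1 = s - 1 + d := by ring
        rw [h3] at hsucc
        linarith [hsucc]
      rw [hfac, hpr, ih]
      ring

theorem fac_eq_mul (s e : Int) (hs : 1 ≤ s) (he : s - 1 ≤ e) :
    fac e = fac (s - 1) * prodRange s e := by
  have hd : e = s - 1 + ((e - (s - 1)).toNat : Int) := by omega
  rw [hd]
  exact fac_mul s hs _

theorem fac_pos (k : Int) : 0 < fac k := by
  unfold fac; exact_mod_cast Nat.factorial_pos _

theorem floordiv_fac (s e : Int) (hs : 1 ≤ s) (he : s - 1 ≤ e) :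
    PySem.Int.floordiv (fac e) (fac (s - 1)) = prodRange s e := by
  rw [fac_eq_mul s e hs he, PySem.Int.floordiv_eq_ediv_of_pos (fac_pos _)]
  exact Int.mul_ediv_cancel_left _ (ne_of_gt (fac_pos _))

-- the factorial table the fold builds
theorem factFold (m : Nat) :
    (PySem.List.pyRange 1 ((m : Int) + 1) 1).foldl
      (fun acc k => acc ++ [PySem.List.pyGetD acc (-1) 0 * k]) [1]
    = (List.range (m + 1)).map (fun k : Nat => (k.factorial : Int)) := by
  induction m with
  | zero => simp [PySem.List.pyRange_one_eq_nil]
  | succ m ih =>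
      have hsr : PySem.List.pyRange 1 ((m : Int) + 1 + 1) 1
          = PySem.List.pyRange 1 ((m : Int) + 1) 1 ++ [(m : Int) + 1] :=
        PySem.List.pyRange_one_succ_right (a := 1) (b := (m : Int) + 1) (by omega)
      have hm1 : ((m + 1 : Nat) : Int) + 1 = (m : Int) + 1 + 1 := by push_cast; ring
      rw [hm1, hsr, List.foldl_append, ih]
      have hr : List.range (m + 1) = List.range m ++ [m] := by
        simp [List.range_succ]
      rw [hr, List.map_append]
      simp only [List.foldl_cons, List.foldl_nil, List.map_cons, List.map_nil,
        PySem.List.pyGetD_neg_one_append_singleton]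
      rw [List.range_succ, List.range_succ]
      simp [Nat.factorial_succ]
      ring

-- the comprehension computes zerosOf
theorem zerosFM : ∀ (bits : List Int) (i : Int),
    (PySem.List.enumerate bits i).filterMap
      (fun p => if p.2 == 0 then some p.1 else none) = zerosOf bits i := by
  intro bits
  induction bits with
  | nil => intro i; simp [PySem.List.enumerate_nil, zerosOf]
  | cons op rest ih =>
      intro i
      rw [PySem.List.enumerate_cons, List.filterMap_cons]
      unfold zerosOf
      simp only [beq_iff_eq] at ih
      by_cases h : op = 0
      · simp [h, ih]
      · simp [h, ih]

theorem zerosOf_bounds : ∀ (bits : List Int) (i z : Int),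
    z ∈ zerosOf bits i → i ≤ z ∧ z ≤ i + bits.length - 1 := by
  intro bits
  induction bits with
  | nil => intro i z hz; simp [zerosOf] at hz
  | cons op rest ih =>
      intro i z hz
      have hlen : ((op :: rest).length : Int) = (rest.length : Int) + 1 := by simp
      unfold zerosOf at hz
      by_cases h : op = 0
      · rw [if_pos h] at hz
        rcases List.mem_cons.mp hz with h1 | h1
        · subst h1; omega
        · have := ih (i + 1) z h1; omega
      · rw [if_neg h] at hz
        have := ih (i + 1) z hz; omega

theorem zerosOf_pairwise : ∀ (bits : List Int) (i : Int),
    (zerosOf bits i).Pairwise (· ≤ ·) := by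
  intro bits
  induction bits with
  | nil => intro i; simp [zerosOf]
  | cons op rest ih =>
      intro i
      unfold zerosOf
      by_cases h : op = 0
      · rw [if_pos h]
        refine List.pairwise_cons.mpr ⟨?_, ih (i + 1)⟩
        intro z hz
        have := zerosOf_bounds rest (i + 1) z hz
        omega
      · rw [if_neg h]; exact ih (i + 1)

-- the zipped floordiv sum is pairSum
theorem zipSum : ∀ (zs : List Int) (s last : Int), 1 ≤ s → s - 1 ≤ last →
    (∀ z ∈ zs, z ≤ last) → (s :: zs).Pairwise (· ≤ ·) →
    (((s :: zs).zip (zs.map (fun z => z - 1) ++ [last])).map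
      (fun p => PySem.Int.floordiv (fac p.2) (fac (p.1 - 1)))).sum = pairSum s zs last := by
  intro zs
  induction zs with
  | nil =>
      intro s last hs hsl _ _
      simp [pairSum, floordiv_fac s last hs hsl]
  | cons z zs ih =>
      intro s last hs hsl hlast hp
      have hsz : s ≤ z := (List.pairwise_cons.mp hp).1 z (List.mem_cons_self ..)
      have hzlast : z ≤ last := hlast z (List.mem_cons_self ..)
      simp only [List.map_cons, List.cons_append, List.zip_cons_cons, List.map, List.sum_cons]
      rw [ih z last (by omega) (by omega)
        (fun z' hz' => hlast z' (List.mem_cons_of_mem _ hz'))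
        (List.pairwise_cons.mp hp).2]
      rw [floordiv_fac s (z - 1) hs (by omega)]
      rfl

-- factorial-table lookup
theorem pyGetD_factmap (n : Nat) (e : Int) (h0 : 0 ≤ e) (h1 : e ≤ (n : Int) + 1) :
    PySem.List.pyGetD ((List.range (n + 2)).map (fun k : Nat => (k.factorial : Int))) e 0
      = fac e := by
  rw [PySem.List.pyGetD_of_nonneg _ _ h0]
  have hlt : e.toNat < n + 2 := by omega
  rw [List.getD_eq_getElem?_getD, List.getElem?_map, List.getElem?_range hlt]
  simp [fac]

-- A's loop computes pairSum over the zero positions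
theorem solveAux_eq : ∀ (bits : List Int) (i s : Int) (stack : List Int), s ≤ i →
    solveAux bits i stack (prodRange s (i - 1))
      = stack.sum + pairSum s (zerosOf bits i) (i + bits.length - 1) := by
  intro bits
  induction bits with
  | nil => intro i s stack _; simp [solveAux, zerosOf, pairSum]
  | cons op rest ih =>
      intro i s stack hsi
      have hlen : ((op :: rest).length : Int) = (rest.length : Int) + 1 := by simp
      have h4 : i + 1 - 1 = i := by ring
      unfold solveAux zerosOf
      by_cases h : op = 0
      · rw [if_neg (by simp [h] : ¬ op ≠ 0), if_pos h]
        have hI := ih (i + 1) i (stack ++ [prodRange s (i - 1)]) (by omega)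
        rw [h4, prodRange_self] at hI
        rw [hI]
        simp only [List.sum_append, List.sum_cons, List.sum_nil, pairSum]
        have h5 : (i + 1) + (rest.length : Int) - 1 = i + ((op :: rest).length : Int) - 1 := by
          rw [hlen]; ring
        rw [h5]
        ring
      · rw [if_pos h, if_neg h]
        rw [prodRange_succ s i hsi]
        have hI := ih (i + 1) s stack (by omega)
        rw [h4] at hI
        rw [hI]
        have h5 : (i + 1) + (rest.length : Int) - 1 = i + ((op :: rest).length : Int) - 1 := by
          rw [hlen]; ring
        rw [h5]

-- ===== VERDICT (by name: the statement is the Claim_ definition above) =====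
theorem solve_spec : Claim_equal_solve := by
  intro bits _
  show solve bits = solve_alt bits
  have hA : solve bits = pairSum 2 (zerosOf bits 2) ((bits.length : Int) + 1) := by
    unfold solve
    have e1 : prodRange 2 (2 - 1) = 1 := prodRange_empty 2
    conv_lhs => rw [← e1]
    rw [solveAux_eq bits 2 2 [] (le_refl 2)]
    have h2 : (2 : Int) + (bits.length : Int) - 1 = (bits.length : Int) + 1 := by ring
    rw [h2]
    simp
  have hB : solve_alt bits = pairSum 2 (zerosOf bits 2) ((bits.length : Int) + 1) := by
    simp only [solve_alt, PySem.List.len_eq]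
    have hfact : (PySem.List.pyRange 1 ((bits.length : Int) + 2) 1).foldl
        (fun acc k => acc ++ [PySem.List.pyGetD acc (-1) 0 * k]) [1]
        = (List.range (bits.length + 1 + 1)).map (fun k : Nat => (k.factorial : Int)) := by
      have hff := factFold (bits.length + 1)
      have hc : ((bits.length + 1 : Nat) : Int) + 1 = (bits.length : Int) + 2 := by
        push_cast; ring
      rw [hc] at hff
      exact hff
    rw [hfact, zerosFM bits 2]
    have hmap : ∀ p ∈ (([2] ++ zerosOf bits 2).zip
          ((zerosOf bits 2).map (fun z => z - 1) ++ [(bits.length : Int) + 1])),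
        PySem.Int.floordiv
          (PySem.List.pyGetD ((List.range (bits.length + 1 + 1)).map
            (fun k : Nat => (k.factorial : Int))) p.2 0)
          (PySem.List.pyGetD ((List.range (bits.length + 1 + 1)).map
            (fun k : Nat => (k.factorial : Int))) (p.1 - 1) 0)
        = PySem.Int.floordiv (fac p.2) (fac (p.1 - 1)) := by
      intro p hp
      obtain ⟨hp1, hp2⟩ := List.of_mem_zip hp
      have hb1 : 1 ≤ p.1 - 1 ∧ p.1 - 1 ≤ (bits.length : Int) + 1 := by
        rcases List.mem_append.mp hp1 with h | h
        · rw [List.mem_singleton] at h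
          omega
        · have := zerosOf_bounds bits 2 p.1 h; omega
      have hb2 : 0 ≤ p.2 ∧ p.2 ≤ (bits.length : Int) + 1 := by
        rcases List.mem_append.mp hp2 with h | h
        · obtain ⟨z, hz, hze⟩ := List.mem_map.mp h
          have := zerosOf_bounds bits 2 z hz; omega
        · rw [List.mem_singleton] at h
          omega
      have hn : bits.length + 1 + 1 = bits.length + 2 := by omega
      rw [hn, pyGetD_factmap bits.length p.2 hb2.1 hb2.2,
        pyGetD_factmap bits.length (p.1 - 1) (by omega) hb1.2]
    rw [List.map_congr_left hmap]
    have hpw : ((2 : Int) :: zerosOf bits 2).Pairwise (· ≤ ·) := by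
      refine List.pairwise_cons.mpr ⟨?_, zerosOf_pairwise bits 2⟩
      intro z hz
      exact (zerosOf_bounds bits 2 z hz).1
    exact zipSum (zerosOf bits 2) 2 ((bits.length : Int) + 1) (by omega)
      (by omega)
      (fun z hz => by have := zerosOf_bounds bits 2 z hz; omega) hpw
  rw [hA, hB]
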